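-- pv_equiv track=rewrite | github.com/drake69/spendify | ui/onboarding_page.py | _fmt_amount
-- ===== SOURCE A (Python) =====
-- _LOCALE: dict[str, dict] = {
--     "it": {"date_display_format": "%d/%m/%Y",  "amount_decimal_sep": ",", "amount_thousands_sep": "."},
--     "en": {"date_display_format": "%d/%m/%Y",  "amount_decimal_sep": ".", "amount_thousands_sep": ","},
--     "fr": {"date_display_format": "%d/%m/%Y",  "amount_decimal_sep": ",", "amount_thousands_sep": " "},
--     "de": {"date_display_format": "%d.%m.%Y",  "amount_decimal_sep": ",", "amount_thousands_sep": "."},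
--     "es": {"date_display_format": "%d/%m/%Y",  "amount_decimal_sep": ",", "amount_thousands_sep": "."},
-- }
--
-- _DEFAULT_LOCALE = _LOCALE["it"]
--
-- def _locale(lang: str) -> dict:
--     return _LOCALE.get(lang, _DEFAULT_LOCALE)
--
-- def _fmt_amount(lang: str) -> str:
--     loc = _locale(lang)
--     dec, thou = loc["amount_decimal_sep"], loc["amount_thousands_sep"]
--     # Format 1234567.89 with the locale separators
--     raw = f"{1_234_567.89:.2f}"          # "1234567.89"
--     int_part, dec_part = raw.split(".")
--     # Group integer part by 3
--     groups = []
--     while int_part: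
--         groups.append(int_part[-3:])
--         int_part = int_part[:-3]
--     return thou.join(reversed(groups)) + dec + dec_part + " €"
-- ===== SOURCE B (Python) =====
-- # The sample amount is a compile-time constant, so interpolate the digit
-- # groups directly around the locale separators: no grouping loop needed.
-- _SEPS: dict[str, tuple[str, str]] = {
--     "it": (",", "."),
--     "en": (".", ","),
--     "fr": (",", " "),
--     "de": (",", "."),
--     "es": (",", "."),
-- }
--
--
-- def _fmt_amount(lang: str) -> str:
--     dec, thou = _SEPS.get(lang, _SEPS["it"])
--     return f"1{thou}234{thou}567{dec}89 \u20ac"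
-- ===== Notes on version B (the rewrite author's own statement) =====
-- stated objective: simpler
-- what changed: B drops A's runtime grouping (the reversed three-digit while-loop over the split float string) and instead interpolates the constant digit groups 1/234/567/89 directly around the locale separators taken from a flat (dec, thou) table.
import Mathlib
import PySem

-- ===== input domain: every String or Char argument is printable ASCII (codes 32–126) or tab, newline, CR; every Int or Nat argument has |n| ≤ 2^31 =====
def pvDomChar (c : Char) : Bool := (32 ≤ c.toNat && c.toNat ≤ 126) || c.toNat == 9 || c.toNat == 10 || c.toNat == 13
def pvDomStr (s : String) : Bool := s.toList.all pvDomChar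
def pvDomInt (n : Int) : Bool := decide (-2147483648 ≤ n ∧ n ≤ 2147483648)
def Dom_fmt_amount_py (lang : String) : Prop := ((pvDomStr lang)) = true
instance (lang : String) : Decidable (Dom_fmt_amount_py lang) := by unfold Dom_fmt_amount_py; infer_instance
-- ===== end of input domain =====

-- B replaces A's grouping loop over the split float string by direct interpolation
-- of the constant digit groups around the locale separators; simpler, same value.

-- ===== PORT A =====
-- string '+' (Lean's String.append is kernel-opaque; this is exact concatenation)
def pvCat (a b : String) : String := String.ofList (a.toList ++ b.toList)

-- module constant _LOCALE
def pvLocale : PySem.Dict String (PySem.Dict String String) :=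
  PySem.Dict.mk [
    ("it", PySem.Dict.mk [("date_display_format", "%d/%m/%Y"), ("amount_decimal_sep", ","), ("amount_thousands_sep", ".")]),
    ("en", PySem.Dict.mk [("date_display_format", "%d/%m/%Y"), ("amount_decimal_sep", "."), ("amount_thousands_sep", ",")]),
    ("fr", PySem.Dict.mk [("date_display_format", "%d/%m/%Y"), ("amount_decimal_sep", ","), ("amount_thousands_sep", " ")]),
    ("de", PySem.Dict.mk [("date_display_format", "%d.%m.%Y"), ("amount_decimal_sep", ","), ("amount_thousands_sep", ".")]),
    ("es", PySem.Dict.mk [("date_display_format", "%d/%m/%Y"), ("amount_decimal_sep", ","), ("amount_thousands_sep", ".")])]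

-- _DEFAULT_LOCALE = _LOCALE["it"] (key present, so .getD default is exact)
def pvDefaultLocale : PySem.Dict String String :=
  (pvLocale.get? "it").getD PySem.Dict.empty

-- _locale(lang)
def pvLocaleOf (lang : String) : PySem.Dict String String :=
  PySem.Dict.getD pvLocale lang pvDefaultLocale

-- the while-loop: groups.append(int_part[-3:]); int_part = int_part[:-3]
-- fuel = |int_part| bounds the iteration count (each step strictly shortens int_part),
-- so the fuel only makes the same computation structurally total
def pvGroupLoop : Nat → List Char → List String → List String
  | _, [], acc => acc
  | 0, _ :: _, acc => acc          -- unreachable: fuel ≥ length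
  | fuel + 1, c :: cs, acc =>
      pvGroupLoop fuel ((c :: cs).take ((c :: cs).length - 3))
        (acc ++ [String.ofList ((c :: cs).drop ((c :: cs).length - 3))])

def fmt_amount_py (lang : String) : String :=
  let loc := pvLocaleOf lang
  -- loc["…"]: both keys are present in every locale dict, so .getD "" is exact
  let dec := PySem.Dict.getD loc "amount_decimal_sep" ""
  let thou := PySem.Dict.getD loc "amount_thousands_sep" ""
  let raw := "1234567.89"                        -- f"{1_234_567.89:.2f}"
  let parts : List String := (PySem.Str.split? raw ".").getD []
  let int_part := List.getD parts 0 ""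
  let dec_part := List.getD parts 1 ""
  let groups := pvGroupLoop (String.toList int_part).length (String.toList int_part) []
  pvCat (pvCat (pvCat (PySem.Str.join thou (List.reverse groups)) dec) dec_part) " €"

-- ===== PORT B =====
-- module constant _SEPS: lang ↦ (dec, thou)
def pvSeps : PySem.Dict String (String × String) :=
  PySem.Dict.mk [
    ("it", (",", ".")),
    ("en", (".", ",")),
    ("fr", (",", " ")),
    ("de", (",", ".")),
    ("es", (",", "."))]

def fmt_amount_py_alt (lang : String) : String :=
  let p := PySem.Dict.getD pvSeps lang ((pvSeps.get? "it").getD ("", ""))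
  -- f"1{thou}234{thou}567{dec}89 €" built left to right
  String.ofList ("1".toList ++ p.2.toList ++ "234".toList ++ p.2.toList
    ++ "567".toList ++ p.1.toList ++ "89 €".toList)

-- ===== PRECONDITION & SPEC =====
def Spec_fmt_amount_py (lang : String) (out : String) : Prop := out = fmt_amount_py_alt lang
instance (lang : String) (out : String) : Decidable (Spec_fmt_amount_py lang out) := by unfold Spec_fmt_amount_py; infer_instance

-- ===== CLAIM =====
def Claim_equal_fmt_amount_py : Prop := ∀ (lang : String), Dom_fmt_amount_py lang → Spec_fmt_amount_py lang (fmt_amount_py lang)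

-- ===== LEMMAS AND PROOFS =====
theorem fmt_eq (lang : String) : fmt_amount_py lang = fmt_amount_py_alt lang := by
  by_cases h1 : lang = "it"; · subst h1; decide
  by_cases h2 : lang = "en"; · subst h2; decide
  by_cases h3 : lang = "fr"; · subst h3; decide
  by_cases h4 : lang = "de"; · subst h4; decide
  by_cases h5 : lang = "es"; · subst h5; decide
  have hA : pvLocale.get? lang = none := by
    simp [pvLocale, PySem.Dict.get?, beq_iff_eq,
      Ne.symm h1, Ne.symm h2, Ne.symm h3, Ne.symm h4, Ne.symm h5]
  have hB : pvSeps.get? lang = none := by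
    simp [pvSeps, PySem.Dict.get?, beq_iff_eq,
      Ne.symm h1, Ne.symm h2, Ne.symm h3, Ne.symm h4, Ne.symm h5]
  simp only [fmt_amount_py, fmt_amount_py_alt, pvLocaleOf, PySem.Dict.getD, hA, hB]
  decide

-- ===== VERDICT =====
theorem fmt_amount_py_spec : Claim_equal_fmt_amount_py := by
  intro lang _
  exact fmt_eq lang
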